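-- pv_equiv track=rewrite | github.com/SarahisCode/ecodes2024 | Story 2/part1.py | add_node
-- ===== SOURCE A (Python) =====
-- from copy import deepcopy
--
-- def add_node(old_tree, item):
--     layer = 0
--     index = 0
--     if len(old_tree) == 0:
--         return [{0:item}]
--     new_tree = deepcopy(old_tree)
--     while True:
--         if layer >= len(old_tree):
--             new_tree.append({index:item})
--             break
--         else:
--             old_index = index
--             if old_index in old_tree[layer].keys():
--                 index *= 2
--                 if old_tree[layer][old_index][0] < item[0]:
--                     index += 1
--                 layer += 1
--             else:
--                 new_tree[layer][index] = item
--                 break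
--     return new_tree
-- ===== SOURCE B (Python) =====
-- def _grow(layers, index, item):
--     if not layers:
--         return [{index: item}]
--     d, rest = layers[0], layers[1:]
--     if index not in d:
--         return [{**d, index: item}] + rest
--     child = 2 * index + (1 if d[index][0] < item[0] else 0)
--     return [d] + _grow(rest, child, item)
--
-- def add_node(old_tree, item):
--     return _grow(old_tree, 0, item)
-- ===== Notes on version B (the rewrite author's own statement) =====
-- stated objective: faster
-- what changed: B drops A's deepcopy of the whole tree: it recursively walks the insertion path once, rebuilding only the list spine and the one modified layer dict while sharing all untouched dicts and node lists.
import Mathlib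
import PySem

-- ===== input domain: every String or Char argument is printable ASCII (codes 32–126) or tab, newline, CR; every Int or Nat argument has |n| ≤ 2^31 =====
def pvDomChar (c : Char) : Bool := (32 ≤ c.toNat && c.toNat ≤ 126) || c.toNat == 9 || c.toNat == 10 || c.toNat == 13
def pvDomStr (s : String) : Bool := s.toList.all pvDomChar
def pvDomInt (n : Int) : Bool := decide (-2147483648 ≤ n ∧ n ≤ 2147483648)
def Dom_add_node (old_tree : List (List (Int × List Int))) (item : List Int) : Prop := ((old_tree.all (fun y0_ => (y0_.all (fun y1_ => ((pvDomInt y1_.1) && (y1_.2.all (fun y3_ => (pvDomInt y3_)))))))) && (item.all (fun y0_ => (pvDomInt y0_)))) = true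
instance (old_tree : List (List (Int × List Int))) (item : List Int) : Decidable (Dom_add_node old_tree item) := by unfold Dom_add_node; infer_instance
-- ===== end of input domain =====

-- B avoids A's deepcopy of the whole tree: it walks down once and rebuilds only the spine,
-- sharing every untouched dict and node list (objective: faster; return value only — A mutates
-- nothing observable, its writes go to a fresh deep copy).

-- ===== PORT A =====
-- A's while-loop: state (layer, index, new_tree); new_tree starts as the deep copy of old_tree
-- (values are immutable here, so the copy is old_tree itself). Each pass either descends
-- (layer+1), inserts into new_tree[layer] and stops, or appends a new layer and stops.
-- item[0] / value[0] are pyGet? with default 0: outside Pre_add_node Python raises IndexError there.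
def add_node_loopA (old_tree : List (List (Int × List Int))) (item : List Int)
    (layer : Nat) (index : Int) (new_tree : List (List (Int × List Int))) :
    List (List (Int × List Int)) :=
  if _h : old_tree.length ≤ layer then
    new_tree ++ [[(index, item)]]
  else
    let d := (PySem.List.pyGet? old_tree (layer : Int)).getD []
    match (PySem.Dict.mk d).get? index with
    | some old_val =>
        let i1 := index * 2
        let i2 := if (PySem.List.pyGet? old_val 0).getD 0 < (PySem.List.pyGet? item 0).getD 0
                  then i1 + 1 else i1
        add_node_loopA old_tree item (layer + 1) i2 new_tree
    | none =>
        new_tree.modify layer (fun dd => ((PySem.Dict.mk dd).insert index item).items)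
  termination_by old_tree.length - layer

def add_node (old_tree : List (List (Int × List Int))) (item : List Int) :
    List (List (Int × List Int)) :=
  if old_tree.length = 0 then [[(0, item)]]
  else add_node_loopA old_tree item 0 0 old_tree

-- ===== PORT B =====
-- B's recursion _grow: no copy of the tree, no counter; rebuild the visited prefix, share the rest.
def add_node_grow (item : List Int) (index : Int) :
    List (List (Int × List Int)) → List (List (Int × List Int))
  | [] => [[(index, item)]]
  | d :: rest =>
    match (PySem.Dict.mk d).get? index with
    | none => ((PySem.Dict.mk d).insert index item).items :: rest
    | some v =>
        let child := 2 * index +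
          (if (PySem.List.pyGet? v 0).getD 0 < (PySem.List.pyGet? item 0).getD 0 then 1 else 0)
        d :: add_node_grow item child rest

def add_node_alt (old_tree : List (List (Int × List Int))) (item : List Int) :
    List (List (Int × List Int)) :=
  add_node_grow item 0 old_tree

-- ===== PRECONDITION & SPEC =====
-- Pre_ excludes the inputs where the programs index an empty list (IndexError): an empty item
-- when the root key 0 exists (so item[0] is compared), or an empty node value stored at a key that
-- can lie on the insertion path (0 ≤ key < 2^layer); this is slightly broader than the exact
-- raising set, which depends on the comparisons along the path — see claim.json cites.
def Pre_add_node (old_tree : List (List (Int × List Int))) (item : List Int) : Prop :=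
  (item ≠ [] ∨ ∀ p ∈ old_tree.head?.getD [], p.1 ≠ 0) ∧
  ∀ q ∈ old_tree.zipIdx, ∀ p ∈ q.1, 0 ≤ p.1 → p.1 < 2 ^ q.2 → p.2 ≠ []
instance (old_tree : List (List (Int × List Int))) (item : List Int) :
    Decidable (Pre_add_node old_tree item) := by unfold Pre_add_node; infer_instance

def pvWitness_add_node : (List (List (Int × List Int))) × List Int :=
  ([[(0, [5])], [(0, [3]), (1, [8])]], [4])

def Spec_add_node (old_tree : List (List (Int × List Int))) (item : List Int)
    (out : List (List (Int × List Int))) : Prop := out = add_node_alt old_tree item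
instance (old_tree : List (List (Int × List Int))) (item : List Int)
    (out : List (List (Int × List Int))) : Decidable (Spec_add_node old_tree item out) := by
  unfold Spec_add_node; infer_instance

-- ===== CLAIM (what is proved, stated in full; the proofs are below) =====
def Claim_equal_add_node : Prop := ∀ (old_tree : List (List (Int × List Int))) (item : List Int), Dom_add_node old_tree item → Pre_add_node old_tree item → Spec_add_node old_tree item (add_node old_tree item)

-- ===== LEMMAS AND PROOFS =====

-- A's loop, run on the unmodified copy, equals the untouched prefix plus B's recursion on the rest.
lemma loopA_eq_grow (old_tree : List (List (Int × List Int))) (item : List Int) :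
    ∀ (layer : Nat) (index : Int),
      add_node_loopA old_tree item layer index old_tree =
        old_tree.take layer ++ add_node_grow item index (old_tree.drop layer) := by
  intro layer index
  induction layer, index using add_node_loopA.induct old_tree item with
  | case1 layer index h =>
      rw [add_node_loopA]
      simp [h, List.drop_eq_nil_of_le h, List.take_of_length_le h, add_node_grow]
  | case2 layer index h d old_val hval i1 i2 ih =>
      have hlt : layer < old_tree.length := by omega
      have hget : (PySem.List.pyGet? old_tree (layer : Int)).getD [] = old_tree[layer] := by
        simp only [PySem.List.pyGet?, PySem.List.pyIdx?]
        simp [hlt]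
      have hd : d = old_tree[layer] := hget
      rw [hd] at hval
      rw [add_node_loopA]
      simp only [dif_neg h, hget, hval]
      have hdrop : old_tree.drop layer = old_tree[layer] :: old_tree.drop (layer + 1) :=
        List.drop_eq_getElem_cons hlt
      rw [hdrop, add_node_grow, hval]
      have htake : old_tree.take (layer + 1) = old_tree.take layer ++ [old_tree[layer]] :=
        List.take_succ_eq_append_getElem hlt
      have harith : (if (PySem.List.pyGet? old_val 0).getD 0 < (PySem.List.pyGet? item 0).getD 0
            then index * 2 + 1 else index * 2) =
          2 * index + (if (PySem.List.pyGet? old_val 0).getD 0 < (PySem.List.pyGet? item 0).getD 0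
            then 1 else 0) := by split <;> ring
      simp only [i2, i1, dite_eq_ite, harith] at ih
      rw [harith, ih, htake]
      simp only [List.append_assoc, List.singleton_append]
  | case3 layer index h d hval =>
      have hlt : layer < old_tree.length := by omega
      have hget : (PySem.List.pyGet? old_tree (layer : Int)).getD [] = old_tree[layer] := by
        simp only [PySem.List.pyGet?, PySem.List.pyIdx?]
        simp [hlt]
      have hd : d = old_tree[layer] := hget
      rw [hd] at hval
      rw [add_node_loopA]
      simp only [dif_neg h, hget, hval]
      have hdrop : old_tree.drop layer = old_tree[layer] :: old_tree.drop (layer + 1) :=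
        List.drop_eq_getElem_cons hlt
      rw [hdrop, add_node_grow, hval]
      rw [List.modify_eq_take_cons_drop hlt]

-- ===== VERDICT (by name: the statement is the Claim_ definition above) =====
theorem add_node_spec : Claim_equal_add_node := by
  intro old_tree item _hdom _hpre
  unfold Spec_add_node add_node add_node_alt
  split
  · rename_i h
    rw [List.length_eq_zero_iff.mp h]
    rfl
  · simpa using loopA_eq_grow old_tree item 0 0
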